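-- pv_equiv track=rewrite | github.com/joshanashakya/dissertation | workspace/dataset/java-python/GeeksForGeeks/3227/A/2.py | findMaxSubarraySumUtil
-- ===== SOURCE A (Python) =====
-- INT_MIN = -2147483648
--
-- def isPresent(B, m, x):
--     for i in range(0, m):
--         if B[i] == x:
--             return True
--     return False
--
-- def findMaxSubarraySumUtil(A, B, n, m):
--
--     #set max_so_far to INT_MIN
--     max_so_far = INT_MIN
--     curr_max = 0
--     for i in range(0, n):
--         if isPresent(B, m, A[i]) == True:
--             curr_max = 0
--             continue
--
--         # Proceed as in Kadane's Algorithm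
--         curr_max = max(A[i], curr_max + A[i])
--         max_so_far = max(max_so_far, curr_max)
--     return max_so_far
-- ===== SOURCE B (Python) =====
-- INT_MIN = -2147483648
--
-- def findMaxSubarraySumUtil(A, B, n, m):
--     blocked = {B[j] for j in range(m)}
--     # phase 1: partition A[0:n] into maximal segments of non-blocked elements
--     segments = []
--     cur = []
--     for i in range(n):
--         x = A[i]
--         if x in blocked:
--             if cur:
--                 segments.append(cur)
--                 cur = []
--         else:
--             cur.append(x)
--     if cur:
--         segments.append(cur)
--     # phase 2: Kadane on each segment, one running maximum across all of them
--     best = INT_MIN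
--     for seg in segments:
--         curr = 0
--         for x in seg:
--             curr = max(x, curr + x)
--             best = max(best, curr)
--     return best
-- ===== Notes on version B (the rewrite author's own statement) =====
-- stated objective: faster
-- what changed: Replaces the single loop that re-scans B via isPresent on every element (O(n*m)) by a two-phase decomposition: build B's membership set once, partition A[0:n] into maximal non-blocked segments, then run a plain Kadane pass over each segment under one running maximum.
-- outside the precondition, e.g. on findMaxSubarraySumUtil([5], [5], 1, 2): A returns -2147483648, B raises IndexError
import Mathlib
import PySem

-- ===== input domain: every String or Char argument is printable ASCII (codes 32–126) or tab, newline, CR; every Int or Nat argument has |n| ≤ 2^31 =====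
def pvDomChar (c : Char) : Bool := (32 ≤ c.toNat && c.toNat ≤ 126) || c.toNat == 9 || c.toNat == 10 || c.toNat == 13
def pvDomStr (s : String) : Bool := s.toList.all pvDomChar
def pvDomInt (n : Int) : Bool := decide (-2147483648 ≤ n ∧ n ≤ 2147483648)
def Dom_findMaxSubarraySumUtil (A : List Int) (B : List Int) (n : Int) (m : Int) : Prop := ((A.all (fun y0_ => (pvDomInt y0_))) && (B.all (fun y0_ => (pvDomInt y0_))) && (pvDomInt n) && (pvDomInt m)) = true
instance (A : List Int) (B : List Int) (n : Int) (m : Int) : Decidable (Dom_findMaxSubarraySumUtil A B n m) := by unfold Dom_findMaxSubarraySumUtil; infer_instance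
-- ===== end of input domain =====

-- B replaces A's one-pass loop (which re-scans B for every element and resets with continue)
-- by a two-phase decomposition: a membership set for B built once, A partitioned into maximal
-- non-blocked segments, then a plain Kadane pass per segment under one running maximum.

-- ===== PORT A =====
def isPresent (B : List Int) (m : Int) (x : Int) : Bool :=
  -- 'for i in range(0, m): if B[i] == x: return True / return False'
  (PySem.List.pyRange 0 m 1).any (fun i => PySem.List.pyGetD B i 0 == x)

def findMaxSubarraySumUtil (A : List Int) (B : List Int) (n : Int) (m : Int) : Int :=
  let st := (PySem.List.pyRange 0 n 1).foldl
    (fun (st : Int × Int) i =>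
      if isPresent B m (PySem.List.pyGetD A i 0) == true then
        (st.1, 0)
      else
        let c := max (PySem.List.pyGetD A i 0) (st.2 + PySem.List.pyGetD A i 0)
        (max st.1 c, c))
    (-2147483648, 0)
  st.1

-- ===== PORT B =====
def findMaxSubarraySumUtil_alt (A : List Int) (B : List Int) (n : Int) (m : Int) : Int :=
  let blocked : PySem.Set Int :=
    PySem.Set.ofList ((PySem.List.pyRange 0 m 1).map (fun j => PySem.List.pyGetD B j 0))
  let st := (PySem.List.pyRange 0 n 1).foldl
    (fun (st : List (List Int) × List Int) i =>
      let x := PySem.List.pyGetD A i 0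
      if PySem.Set.contains blocked x then
        if st.2 ≠ [] then (st.1 ++ [st.2], ([] : List Int)) else st
      else (st.1, st.2 ++ [x]))
    ([], [])
  let segments := if st.2 ≠ [] then st.1 ++ [st.2] else st.1
  segments.foldl
    (fun best seg =>
      (seg.foldl (fun (p : Int × Int) x =>
          let c := max x (p.2 + x)
          (max p.1 c, c)) (best, 0)).1)
    (-2147483648)

-- ===== PRECONDITION & SPEC =====
-- Pre_ excludes n > len(A) or m > len(B): A raises IndexError there, except on the corner
-- where every scanned A[i] occurs in B so isPresent's early return hides the out-of-range m
-- and A returns INT_MIN — on those inputs B itself raises IndexError building the set.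
def Pre_findMaxSubarraySumUtil (A : List Int) (B : List Int) (n : Int) (m : Int) : Prop :=
  n ≤ (A.length : Int) ∧ m ≤ (B.length : Int)
instance (A : List Int) (B : List Int) (n : Int) (m : Int) : Decidable (Pre_findMaxSubarraySumUtil A B n m) := by unfold Pre_findMaxSubarraySumUtil; infer_instance
def pvWitness_findMaxSubarraySumUtil : List Int × List Int × Int × Int := ([1, -2, 3, 2, -1], [2], 5, 1)

def Spec_findMaxSubarraySumUtil (A : List Int) (B : List Int) (n : Int) (m : Int) (out : Int) : Prop := out = findMaxSubarraySumUtil_alt A B n m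
instance (A : List Int) (B : List Int) (n : Int) (m : Int) (out : Int) : Decidable (Spec_findMaxSubarraySumUtil A B n m out) := by unfold Spec_findMaxSubarraySumUtil; infer_instance

-- ===== CLAIM (what is proved, stated in full; the proofs are below) =====
def Claim_equal_findMaxSubarraySumUtil : Prop := ∀ (A : List Int) (B : List Int) (n : Int) (m : Int), Dom_findMaxSubarraySumUtil A B n m → Pre_findMaxSubarraySumUtil A B n m → Spec_findMaxSubarraySumUtil A B n m (findMaxSubarraySumUtil A B n m)

-- ===== LEMMAS AND PROOFS =====

-- Kadane over one segment, threading (best, curr) from a given best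
def runSeg (b : Int) (seg : List Int) : Int × Int :=
  seg.foldl (fun (p : Int × Int) x => let c := max x (p.2 + x); (max p.1 c, c)) (b, 0)

def foldBest (segs : List (List Int)) : Int :=
  segs.foldl (fun best seg => (runSeg best seg).1) (-2147483648)

def FF (segs : List (List Int)) (cur : List Int) : Int × Int := runSeg (foldBest segs) cur

-- A's loop body and B's segmentation loop body, abstracted over the membership test p and A-lookup g
def stepA (p : Int → Bool) (g : Int → Int) (st : Int × Int) (i : Int) : Int × Int :=
  if p (g i) then (st.1, 0)
  else
    let c := max (g i) (st.2 + g i)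
    (max st.1 c, c)

def stepB (p : Int → Bool) (g : Int → Int) (st : List (List Int) × List Int) (i : Int) :
    List (List Int) × List Int :=
  let x := g i
  if p x then
    if st.2 ≠ [] then (st.1 ++ [st.2], ([] : List Int)) else st
  else (st.1, st.2 ++ [x])

theorem runSeg_append (b : Int) (cur : List Int) (x : Int) :
    runSeg b (cur ++ [x]) =
      (max (runSeg b cur).1 (max x ((runSeg b cur).2 + x)), max x ((runSeg b cur).2 + x)) := by
  simp [runSeg, List.foldl_append]

theorem foldBest_append (segs : List (List Int)) (s : List Int) :
    foldBest (segs ++ [s]) = (runSeg (foldBest segs) s).1 := by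
  simp [foldBest, List.foldl_append]

theorem runSeg_nil (b : Int) : runSeg b [] = (b, 0) := rfl

theorem FF_nil (segs : List (List Int)) : FF segs [] = (foldBest segs, 0) := rfl

-- the core invariant: A's one-pass fold, started from FF segs cur, lands on FF of B's fold state
theorem loop_inv (p : Int → Bool) (g : Int → Int) (idxs : List Int) :
    ∀ (segs : List (List Int)) (cur : List Int),
      idxs.foldl (stepA p g) (FF segs cur)
        = FF (idxs.foldl (stepB p g) (segs, cur)).1 (idxs.foldl (stepB p g) (segs, cur)).2 := by
  induction idxs with
  | nil => intro segs cur; rfl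
  | cons i rest ih =>
      intro segs cur
      rw [List.foldl_cons, List.foldl_cons]
      by_cases hp : p (g i) = true
      · by_cases hc : cur = []
        · subst hc
          have hA : stepA p g (FF segs []) i = FF segs [] := by
            simp [stepA, hp, FF_nil]
          have hB : stepB p g (segs, []) i = (segs, []) := by simp [stepB, hp]
          rw [hA, hB]; exact ih segs []
        · have hA : stepA p g (FF segs cur) i = FF (segs ++ [cur]) [] := by
            simp [stepA, hp, FF, foldBest_append, runSeg_nil]
          have hB : stepB p g (segs, cur) i = (segs ++ [cur], []) := by
            simp [stepB, hp, hc]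
          rw [hA, hB]; exact ih (segs ++ [cur]) []
      · have hA : stepA p g (FF segs cur) i = FF segs (cur ++ [g i]) := by
          simp [stepA, hp, FF, runSeg_append]
        have hB : stepB p g (segs, cur) i = (segs, cur ++ [g i]) := by
          simp [stepB, hp]
        rw [hA, hB]; exact ih segs (cur ++ [g i])

-- B's membership test equals A's linear scan of B
theorem contains_eq_isPresent (B : List Int) (m x : Int) :
    PySem.Set.contains
      (PySem.Set.ofList ((PySem.List.pyRange 0 m 1).map (fun j => PySem.List.pyGetD B j 0))) x
      = isPresent B m x := by
  rcases h : isPresent B m x with _ | _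
  · rw [Bool.eq_false_iff]
    intro hc
    have hmem := (PySem.Set.contains_iff _ _).1 hc
    rw [PySem.Set.mem_ofList, List.mem_map] at hmem
    obtain ⟨j, hj, hfj⟩ := hmem
    have : isPresent B m x = true := by
      unfold isPresent
      rw [List.any_eq_true]
      exact ⟨j, hj, by simp [hfj]⟩
    rw [h] at this; exact Bool.false_ne_true this
  · unfold isPresent at h
    rw [List.any_eq_true] at h
    obtain ⟨j, hj, hfj⟩ := h
    apply (PySem.Set.contains_iff _ _).2
    rw [PySem.Set.mem_ofList, List.mem_map]
    exact ⟨j, hj, by simpa using hfj⟩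

-- the two abstracted programs agree
theorem main_eq (p : Int → Bool) (g : Int → Int) (n : Int) :
    ((PySem.List.pyRange 0 n 1).foldl (stepA p g) (-2147483648, 0)).1
      = (let st := (PySem.List.pyRange 0 n 1).foldl (stepB p g) ([], []);
         let segments := if st.2 ≠ [] then st.1 ++ [st.2] else st.1;
         segments.foldl (fun best seg => (runSeg best seg).1) (-2147483648)) := by
  have h0 : ((-2147483648 : Int), (0 : Int)) = FF [] [] := rfl
  rw [h0, loop_inv p g (PySem.List.pyRange 0 n 1) [] []]
  set st := (PySem.List.pyRange 0 n 1).foldl (stepB p g) ([], []) with hst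
  by_cases hc : st.2 = []
  · simp only [hc, ne_eq, not_true_eq_false, if_false]
    rw [FF_nil]
    rfl
  · simp only [ne_eq, hc, not_false_eq_true, if_true]
    have h1 : (FF st.1 st.2).1 = foldBest (st.1 ++ [st.2]) := by
      rw [foldBest_append]; rfl
    rw [h1]
    rfl

-- ===== VERDICT (by name: the statement is the Claim_ definition above) =====
theorem findMaxSubarraySumUtil_spec : Claim_equal_findMaxSubarraySumUtil := by
  intro A B n m _ _
  unfold Spec_findMaxSubarraySumUtil findMaxSubarraySumUtil findMaxSubarraySumUtil_alt
  simp only [beq_true, contains_eq_isPresent]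
  exact main_eq (fun x => isPresent B m x) (fun i => PySem.List.pyGetD A i 0) n
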